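-- pv_equiv track=rewrite | github.com/owenwu811/LeetCode-Solutions-Python- | numberofsubarrayshavingevenproduct.py | evenProduct
-- ===== SOURCE A (Python) =====
-- from typing import List
--
-- def evenProduct(nums: List[int]) -> int:
--     res = 0
--     cur = -1 #declaring last even as -1 because you will add + 1 to the current index if we see an even number because -1 + 1 = 0
--     for i, n in enumerate(nums):
--         if n % 2 == 0:
--             cur = i #a subarray's product becomes even as soon as it includes even one even number
--         res += (cur + 1)
--     return res
-- ===== SOURCE B (Python) =====
-- def evenProduct(nums):
--     total = len(nums) * (len(nums) + 1) // 2
--     odd = 0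
--     run = 0
--     for n in nums:
--         if n % 2 == 0:
--             odd += run * (run + 1) // 2
--             run = 0
--         else:
--             run += 1
--     odd += run * (run + 1) // 2
--     return total - odd
-- ===== Notes on version B (the rewrite author's own statement) =====
-- stated objective: alternative
-- what changed: Complementary counting: B returns total subarrays n(n+1)/2 minus the all-odd subarrays counted per maximal odd run (run*(run+1)/2), instead of A's per-index sum of last-even-position+1.
import Mathlib
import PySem

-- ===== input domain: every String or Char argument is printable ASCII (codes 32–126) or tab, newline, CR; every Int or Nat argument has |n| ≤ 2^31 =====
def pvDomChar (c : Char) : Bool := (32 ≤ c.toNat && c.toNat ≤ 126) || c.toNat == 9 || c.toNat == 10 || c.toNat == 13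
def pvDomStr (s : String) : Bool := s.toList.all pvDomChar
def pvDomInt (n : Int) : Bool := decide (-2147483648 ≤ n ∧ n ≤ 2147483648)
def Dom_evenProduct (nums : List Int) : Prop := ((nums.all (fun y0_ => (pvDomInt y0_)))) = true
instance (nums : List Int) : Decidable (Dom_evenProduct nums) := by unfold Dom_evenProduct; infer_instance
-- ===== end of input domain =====

-- B counts by complement (all subarrays minus all-odd subarrays per maximal odd run) instead of
-- A's per-index sum of (last even index + 1); same O(n) cost, different decomposition.

-- ===== PORT A =====
-- one loop step of A: cur updated to the index on an even element, then res += cur + 1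
def pvAstep (st : Int × Int) (p : Int × Int) : Int × Int :=
  let cur := if PySem.Int.mod p.2 2 == 0 then p.1 else st.2
  (st.1 + (cur + 1), cur)

def evenProduct (nums : List Int) : Int :=
  ((PySem.List.enumerate nums 0).foldl pvAstep (0, -1)).1

-- ===== PORT B =====
-- one loop step of B: on an even element close the current odd run, else extend it
def pvBstep (st : Int × Int) (n : Int) : Int × Int :=
  if PySem.Int.mod n 2 == 0 then
    (st.1 + PySem.Int.floordiv (st.2 * (st.2 + 1)) 2, 0)
  else
    (st.1, st.2 + 1)

def evenProduct_alt (nums : List Int) : Int :=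
  let total := PySem.Int.floordiv ((nums.length : Int) * ((nums.length : Int) + 1)) 2
  let st := nums.foldl pvBstep (0, 0)
  total - (st.1 + PySem.Int.floordiv (st.2 * (st.2 + 1)) 2)

-- ===== PRECONDITION & SPEC =====
def Spec_evenProduct (nums : List Int) (out : Int) : Prop := out = evenProduct_alt nums
instance (nums : List Int) (out : Int) : Decidable (Spec_evenProduct nums out) := by unfold Spec_evenProduct; infer_instance

-- ===== CLAIM (what is proved, stated in full; the proofs are below) =====
def Claim_equal_evenProduct : Prop := ∀ (nums : List Int), Dom_evenProduct nums → Spec_evenProduct nums (evenProduct nums)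

-- ===== LEMMAS AND PROOFS =====

-- run*(run+1) is twice a triangular number, and floordiv by 2 recovers it exactly
lemma pvHalf_mul_succ (r : Int) : 2 * PySem.Int.floordiv (r * (r + 1)) 2 = r * (r + 1) := by
  obtain ⟨k, hk⟩ := Int.even_mul_succ_self r
  rw [hk, PySem.Int.floordiv_eq_ediv_of_pos (by omega)]
  omega

-- joint loop invariant: A's running (res, cur) and B's (odd, run) stay linked by
-- cur = i - 1 - run and 2*(res + odd) + run*(run+1) = i*(i+1), where i counts processed elements
lemma pvLoop_inv : ∀ (l : List Int) (i res cur odd run : Int),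
    cur = i - 1 - run →
    2 * (res + odd) + run * (run + 1) = i * (i + 1) →
    2 * (((PySem.List.enumerate l i).foldl pvAstep (res, cur)).1
        + (l.foldl pvBstep (odd, run)).1)
      + (l.foldl pvBstep (odd, run)).2 * ((l.foldl pvBstep (odd, run)).2 + 1)
      = (i + l.length) * (i + l.length + 1) := by
  intro l
  induction l with
  | nil => intro i res cur odd run hcur hinv; simpa using hinv
  | cons x xs ih =>
    intro i res cur odd run hcur hinv
    rw [PySem.List.enumerate_cons]
    simp only [List.foldl_cons]
    by_cases hx : PySem.Int.mod x 2 == 0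
    · simp only [pvAstep, pvBstep, hx, if_pos]
      have h := ih (i + 1) (res + (i + 1)) i
        (odd + PySem.Int.floordiv (run * (run + 1)) 2) 0
        (by ring)
        (by have := pvHalf_mul_succ run; nlinarith)
      simp only [List.length_cons]
      push_cast
      push_cast at h
      linarith [h]
    · simp only [pvAstep, pvBstep, hx, if_neg, Bool.false_eq_true, not_false_iff]
      have h := ih (i + 1) (res + (cur + 1)) cur odd (run + 1)
        (by omega)
        (by nlinarith)
      simp only [List.length_cons]
      push_cast
      push_cast at h
      linarith [h]

-- ===== VERDICT (by name: the statement is the Claim_ definition above) =====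
theorem evenProduct_spec : Claim_equal_evenProduct := by
  intro nums _
  unfold Spec_evenProduct evenProduct evenProduct_alt
  have h := pvLoop_inv nums 0 0 (-1) 0 0 (by ring) (by ring)
  simp only [zero_add] at h
  have ht : 2 * PySem.Int.floordiv ((nums.length : Int) * ((nums.length : Int) + 1)) 2
      = (nums.length : Int) * ((nums.length : Int) + 1) := pvHalf_mul_succ _
  have hr := pvHalf_mul_succ ((nums.foldl pvBstep (0, 0)).2)
  linarith [h, ht, hr]
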